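-- pv_equiv track=rewrite | github.com/felipefritz/cotizador-utiles-escolares | app/postprocess.py | postprocess_items
-- ===== SOURCE A (Python) =====
-- LECTURA_KEYS = ("lectura", "lecturas complementarias", "libro", "novela")
--
-- def postprocess_items(items: list[dict]) -> list[dict]:
--     current_subject = None
--
--     for it in items:
--         asig = it.get("asignatura")
--         detalle = (it.get("detalle") or "").strip().lower()
--         orig = (it.get("item_original") or "").strip().lower()
--
--         # Mantén "contexto" de asignatura
--         if asig:
--             current_subject = asig
--         else:
--             # si no viene asignatura, hereda la última
--             it["asignatura"] = current_subject
--
--         # Detecta lecturas complementarias (libros)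
--         if any(k in detalle for k in LECTURA_KEYS) or (" - " in it.get("item_original", "")):
--             # heurística simple: si parece título-autor, es lectura
--             if it.get("unidad") is None:
--                 it["tipo"] = "lectura"
--                 # opcional: fuerza asignatura "LENGUAJE"
--                 if it.get("asignatura") is None:
--                     it["asignatura"] = "LENGUAJE"
--
--     return items
-- ===== SOURCE B (Python) =====
-- # B: precompute the inherited-subject context as a parallel list, then rewrite
-- # each (item, subject) pair independently; mutates item dicts in place like A.
--
-- def _transform(it, subj):
--     if not it.get("asignatura"):
--         it["asignatura"] = subj
--     d = (it.get("detalle") or "").strip().lower()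
--     is_lec = ("lectura" in d or "libro" in d or "novela" in d
--               or " - " in it.get("item_original", ""))
--     if is_lec and it.get("unidad") is None:
--         it["tipo"] = "lectura"
--         if it.get("asignatura") is None:
--             it["asignatura"] = "LENGUAJE"
--     return it
--
-- def postprocess_items(items: list[dict]) -> list[dict]:
--     subjects = []
--     cur = None
--     for it in items:
--         a = it.get("asignatura")
--         if a:
--             cur = a
--         subjects.append(cur)
--     return [_transform(it, s) for it, s in zip(items, subjects)]
-- ===== Notes on version B (the rewrite author's own statement) =====
-- stated objective: alternative
-- what changed: A's single stateful loop is replaced by a two-stage pipeline: first build the parallel list of inherited subjects, then zip it with the items and rewrite each (item, subject) pair independently via a _transform helper (keyword test reduced to three keys since 'lecturas complementarias' contains 'lectura').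
import Mathlib
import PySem

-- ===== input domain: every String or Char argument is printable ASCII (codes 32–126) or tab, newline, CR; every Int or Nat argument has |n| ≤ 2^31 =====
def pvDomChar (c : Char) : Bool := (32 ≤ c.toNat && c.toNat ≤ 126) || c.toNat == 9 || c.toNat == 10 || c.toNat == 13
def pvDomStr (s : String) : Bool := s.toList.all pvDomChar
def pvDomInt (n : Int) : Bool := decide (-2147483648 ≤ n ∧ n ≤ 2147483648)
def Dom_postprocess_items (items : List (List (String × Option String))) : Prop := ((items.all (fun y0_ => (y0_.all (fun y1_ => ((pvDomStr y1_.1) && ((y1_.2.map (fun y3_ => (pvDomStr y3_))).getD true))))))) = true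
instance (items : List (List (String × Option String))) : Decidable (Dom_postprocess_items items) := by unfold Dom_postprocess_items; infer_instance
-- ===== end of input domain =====

-- B precomputes the inherited-subject context as a parallel list, then rewrites each
-- (item, subject) pair independently with zip; return value only is proved equal —
-- both Pythons mutate the item dicts in place alike.

-- ===== PORT A =====
-- dict primitives ported by hand (exact for dicts, i.e. lists without duplicate keys,
-- which Pre_ requires): first-match lookup (d.get) and overwrite-or-append (d[k] = v)
def dget : List (String × Option String) → String → Option (Option String)
  | [], _ => none
  | (k', v') :: rest, k => if k' = k then some v' else dget rest k

def dset : List (String × Option String) → String → Option String → List (String × Option String)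
  | [], k, v => [(k, v)]
  | (k', v') :: rest, k, v => if k' = k then (k', v) :: rest else (k', v') :: dset rest k v

-- (it.get("detalle") or "").strip().lower()
def detalleOf (it : List (String × Option String)) : String :=
  PySem.Str.lower (PySem.Str.strip (match dget it "detalle" with | some (some s) => s | _ => ""))

-- " - " in it.get("item_original", "")  (value None would raise in Python: excluded by Pre_, port gives false)
def dashOf (it : List (String × Option String)) : Bool :=
  match dget it "item_original" with | some (some s) => PySem.Str.isIn " - " s | _ => false

-- it.get("unidad") is None
def unidadNone (it : List (String × Option String)) : Bool :=
  match dget it "unidad" with | some (some _) => false | _ => true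

-- it.get("asignatura") is None
def asigIsNone (it : List (String × Option String)) : Bool :=
  match dget it "asignatura" with | some (some _) => false | _ => true

-- any(k in detalle for k in LECTURA_KEYS)
def lecturaAny (d : String) : Bool :=
  PySem.Str.isIn "lectura" d || PySem.Str.isIn "lecturas complementarias" d ||
  PySem.Str.isIn "libro" d || PySem.Str.isIn "novela" d

-- A's loop, step for step (the unused variable `orig` is dropped)
def aLoop : List (List (String × Option String)) → Option String → List (List (String × Option String))
  | [], _ => []
  | it :: rest, cs =>
    let asig : Option String := match dget it "asignatura" with | some v => v | none => none
    let detalle := detalleOf it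
    let truthy : Bool := match asig with | some s => s != "" | none => false
    let cs' := if truthy then asig else cs
    let it1 := if truthy then it else dset it "asignatura" cs
    let it2 :=
      if lecturaAny detalle || dashOf it1 then
        if unidadNone it1 then
          let t := dset it1 "tipo" (some "lectura")
          if asigIsNone t then dset t "asignatura" (some "LENGUAJE") else t
        else it1
      else it1
    it2 :: aLoop rest cs'

def postprocess_items (items : List (List (String × Option String))) : List (List (String × Option String)) :=
  aLoop items none

-- ===== PORT B =====
-- it.get(k): first match, flattened (absent and value-None both read as Python None)
def bGet (it : List (String × Option String)) (k : String) : Option String :=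
  ((PySem.Dict.mk it).get? k).join

-- it[k] = v via the PySem dict primitive
def bSet (it : List (String × Option String)) (k : String) (v : Option String) :
    List (String × Option String) :=
  ((PySem.Dict.mk it).insert k v).items

def bTruthy (o : Option String) : Bool := o.any (· != "")

-- d = (it.get("detalle") or "").strip().lower()
def bDetalle (it : List (String × Option String)) : String :=
  PySem.Str.lower (PySem.Str.strip ((bGet it "detalle").getD ""))

-- it.get("item_original", "")  (a present None value raises in Python: excluded by Pre_)
def bOrig (it : List (String × Option String)) : String :=
  (bGet it "item_original").getD ""

-- is_lec: three keywords ("lecturas complementarias" contains "lectura") or title-author dash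
def bIsLec (it : List (String × Option String)) : Bool :=
  let d := bDetalle it
  PySem.Str.isIn "lectura" d || PySem.Str.isIn "libro" d || PySem.Str.isIn "novela" d ||
    PySem.Str.isIn " - " (bOrig it)

-- _transform(it, subj)
def bTransform (it : List (String × Option String)) (subj : Option String) :
    List (String × Option String) :=
  let it1 := if bTruthy (bGet it "asignatura") then it else bSet it "asignatura" subj
  if bIsLec it1 && (bGet it1 "unidad").isNone then
    let t := bSet it1 "tipo" (some "lectura")
    if (bGet t "asignatura").isNone then bSet t "asignatura" (some "LENGUAJE") else t
  else it1

-- pass 1 of B: the inherited subject at each position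
def bSubjects : List (List (String × Option String)) → Option String → List (Option String)
  | [], _ => []
  | it :: rest, cur =>
    let cur' := if bTruthy (bGet it "asignatura") then bGet it "asignatura" else cur
    cur' :: bSubjects rest cur'

def postprocess_items_alt (items : List (List (String × Option String))) :
    List (List (String × Option String)) :=
  List.zipWith bTransform items (bSubjects items none)

-- ===== PRECONDITION & SPEC =====
-- Pre_ requires (a) each item to be a genuine dict image — no duplicate keys (a Python
-- dict cannot contain them, so no Python input is excluded by this) — and (b) excludes
-- exactly the inputs on which Python A raises TypeError: an item whose "item_original"
-- value is None while no LECTURA_KEY occurs in its detalle (then `" - " in None` is evaluated).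
def Pre_postprocess_items (items : List (List (String × Option String))) : Prop :=
  ∀ it ∈ items, (it.map Prod.fst).Nodup ∧
    (List.lookup "item_original" it = some none →
      lecturaAny (PySem.Str.lower (PySem.Str.strip (((List.lookup "detalle" it).join).getD ""))) = true)

instance (items : List (List (String × Option String))) : Decidable (Pre_postprocess_items items) := by
  unfold Pre_postprocess_items; infer_instance

def pvWitness_postprocess_items : (List (List (String × Option String))) :=
  [[("asignatura", some "MAT")], [("detalle", some "un Libro"), ("item_original", none)]]

def Spec_postprocess_items (items : List (List (String × Option String))) (out : List (List (String × Option String))) : Prop := out = postprocess_items_alt items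
instance (items : List (List (String × Option String))) (out : List (List (String × Option String))) : Decidable (Spec_postprocess_items items out) := by unfold Spec_postprocess_items; infer_instance

-- ===== CLAIM (what is proved, stated in full; the proofs are below) =====
def Claim_equal_postprocess_items : Prop := ∀ (items : List (List (String × Option String))), Dom_postprocess_items items → Pre_postprocess_items items → Spec_postprocess_items items (postprocess_items items)

-- ===== LEMMAS AND PROOFS =====
-- keysNodup: the item is the image of a Python dict
def keysNodup (l : List (String × Option String)) : Prop := (l.map Prod.fst).Nodup

theorem get?_mk_eq_dget (l : List (String × Option String)) (k : String) :
    (PySem.Dict.mk l).get? k = dget l k := by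
  induction l with
  | nil => rfl
  | cons p rest ih =>
    obtain ⟨k', v'⟩ := p
    rw [PySem.Dict.get?_mk_cons, dget]
    by_cases h : k' = k <;> simp [h, ih]

theorem bGet_eq (l : List (String × Option String)) (k : String) :
    bGet l k = (dget l k).join := by
  unfold bGet; rw [get?_mk_eq_dget]

theorem map_noop_of_not_mem (l : List (String × Option String)) (k : String)
    (v : Option String) (h : k ∉ l.map Prod.fst) :
    l.map (fun p => if p.1 = k then (k, v) else p) = l := by
  induction l with
  | nil => rfl
  | cons p rest ih =>
    simp only [List.map_cons, List.mem_cons, not_or] at h ⊢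
    rw [if_neg (fun e => h.1 e.symm), ih h.2]

theorem bSet_eq_dset (l : List (String × Option String)) (k : String) (v : Option String)
    (h : keysNodup l) : bSet l k v = dset l k v := by
  induction l with
  | nil => rfl
  | cons p rest ih =>
    obtain ⟨k', v'⟩ := p
    have hh : (k' :: rest.map Prod.fst).Nodup := by simpa [keysNodup] using h
    obtain ⟨h1, h2⟩ := List.nodup_cons.mp hh
    by_cases hk : k' = k
    · subst hk
      have hmap := map_noop_of_not_mem rest k' v h1
      simp [bSet, PySem.Dict.insert, PySem.Dict.contains, dset, hmap]
    · have hb : (k' == k) = false := by simp [hk]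
      by_cases hc : (rest.any fun p => p.1 == k) = true
      · have hrest : (List.map (fun p => if p.1 = k then (k, v) else p) rest)
            = dset rest k v := by
          have := ih h2
          simpa [bSet, PySem.Dict.insert, PySem.Dict.contains, hc, beq_iff_eq] using this
        simp [bSet, PySem.Dict.insert, PySem.Dict.contains, hc, hb, dset, hk, hrest]
      · have hcf : (rest.any fun p => p.1 == k) = false := Bool.eq_false_iff.mpr hc
        have hrest : rest ++ [(k, v)] = dset rest k v := by
          have := ih h2
          simpa [bSet, PySem.Dict.insert, PySem.Dict.contains, hcf] using this
        simp [bSet, PySem.Dict.insert, PySem.Dict.contains, hcf, hb, dset, hk, hrest]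

theorem mem_keys_dset (l : List (String × Option String)) (k a : String) (v : Option String)
    (h : a ∈ (dset l k v).map Prod.fst) : a ∈ l.map Prod.fst ∨ a = k := by
  induction l with
  | nil => exact Or.inr (by simpa [dset] using h)
  | cons p rest ih =>
    obtain ⟨k', v'⟩ := p
    by_cases hk : k' = k
    · left
      simp only [dset, if_pos hk, List.map_cons] at h
      simpa using h
    · simp only [dset, if_neg hk, List.map_cons, List.mem_cons] at h ⊢
      rcases h with h | h
      · exact Or.inl (Or.inl h)
      · rcases ih h with h' | h'
        · exact Or.inl (Or.inr h')
        · exact Or.inr h'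

theorem keysNodup_dset (l : List (String × Option String)) (k : String) (v : Option String)
    (h : keysNodup l) : keysNodup (dset l k v) := by
  induction l with
  | nil => simp [keysNodup, dset]
  | cons p rest ih =>
    obtain ⟨k', v'⟩ := p
    have hh : (k' :: rest.map Prod.fst).Nodup := by simpa [keysNodup] using h
    obtain ⟨h1, h2⟩ := List.nodup_cons.mp hh
    by_cases hk : k' = k
    · show ((dset ((k', v') :: rest) k v).map Prod.fst).Nodup
      simp only [dset, if_pos hk, List.map_cons]
      exact List.nodup_cons.mpr ⟨h1, h2⟩
    · show ((dset ((k', v') :: rest) k v).map Prod.fst).Nodup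
      simp only [dset, if_neg hk, List.map_cons]
      refine List.nodup_cons.mpr ⟨?_, ih h2⟩
      intro hm
      rcases mem_keys_dset rest k k' v hm with h' | h'
      · exact h1 h'
      · exact hk h'

theorem dget_dset_ne (d : List (String × Option String)) (k k' : String) (v : Option String)
    (h : k ≠ k') : dget (dset d k' v) k = dget d k := by
  have h' : ¬ k' = k := fun e => h e.symm
  induction d with
  | nil => simp [dget, dset, h']
  | cons p rest ih =>
    obtain ⟨pk, pv⟩ := p
    by_cases hk : pk = k'
    · simp [dset, dget, hk, h']
    · simp only [dset, if_neg hk, dget]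
      by_cases h2 : pk = k <;> simp [h2, ih]

theorem lectura_of_complementarias (d : String)
    (h : PySem.Str.isIn "lecturas complementarias" d = true) :
    PySem.Str.isIn "lectura" d = true := by
  rw [PySem.Str.isIn_iff_infix] at h ⊢
  exact List.IsInfix.trans (by decide) h

theorem lecturaAny_eq (d : String) :
    lecturaAny d = (PySem.Str.isIn "lectura" d || PySem.Str.isIn "libro" d || PySem.Str.isIn "novela" d) := by
  unfold lecturaAny
  cases h2 : PySem.Str.isIn "lecturas complementarias" d with
  | false => simp only [Bool.or_false]
  | true =>
    have h1 := lectura_of_complementarias d h2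
    simp only [h1, Bool.true_or]

theorem detalleOf_dset_asig (it : List (String × Option String)) (v : Option String) :
    detalleOf (dset it "asignatura" v) = detalleOf it := by
  unfold detalleOf
  rw [dget_dset_ne it "detalle" "asignatura" v (by decide)]

theorem bDetalle_eq (l : List (String × Option String)) : bDetalle l = detalleOf l := by
  unfold bDetalle detalleOf
  rw [bGet_eq]
  rcases h : dget l "detalle" with _ | ov
  · rfl
  · rcases ov with _ | s <;> rfl

theorem bOrig_dash (l : List (String × Option String)) :
    PySem.Str.isIn " - " (bOrig l) = dashOf l := by
  unfold bOrig dashOf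
  rw [bGet_eq]
  rcases h : dget l "item_original" with _ | ov
  · decide
  · rcases ov with _ | s
    · decide
    · rfl

theorem bUnidad_eq (l : List (String × Option String)) :
    (bGet l "unidad").isNone = unidadNone l := by
  unfold unidadNone
  rw [bGet_eq]
  rcases h : dget l "unidad" with _ | ov
  · rfl
  · rcases ov with _ | s <;> rfl

theorem bAsigNone_eq (l : List (String × Option String)) :
    (bGet l "asignatura").isNone = asigIsNone l := by
  unfold asigIsNone
  rw [bGet_eq]
  rcases h : dget l "asignatura" with _ | ov
  · rfl
  · rcases ov with _ | s <;> rfl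

theorem bTruthy_eq (l : List (String × Option String)) :
    bTruthy (bGet l "asignatura")
      = (match (match dget l "asignatura" with | some v => v | none => none) with
         | some s => s != "" | none => false) := by
  rw [bTruthy, bGet_eq]
  rcases dget l "asignatura" with _ | ov
  · rfl
  · rcases ov with _ | s <;> rfl

-- the lectura tagging applied to the pass-1 item: A's hand-rolled dict ops = B's PySem ops
theorem lec_eq (it1 : List (String × Option String)) (dA : String)
    (hd : detalleOf it1 = dA) (hn : keysNodup it1) :
    (if lecturaAny dA || dashOf it1 then
       if unidadNone it1 then
         if asigIsNone (dset it1 "tipo" (some "lectura")) then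
           dset (dset it1 "tipo" (some "lectura")) "asignatura" (some "LENGUAJE")
         else dset it1 "tipo" (some "lectura")
       else it1
     else it1)
    = (if bIsLec it1 && (bGet it1 "unidad").isNone then
         if (bGet (bSet it1 "tipo" (some "lectura")) "asignatura").isNone then
           bSet (bSet it1 "tipo" (some "lectura")) "asignatura" (some "LENGUAJE")
         else bSet it1 "tipo" (some "lectura")
       else it1) := by
  have hb : bIsLec it1 = (lecturaAny dA || dashOf it1) := by
    simp only [bIsLec]
    rw [bDetalle_eq, hd, bOrig_dash, lecturaAny_eq]
  rw [hb, bUnidad_eq, bSet_eq_dset it1 _ _ hn, bAsigNone_eq,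
      bSet_eq_dset (dset it1 "tipo" (some "lectura")) _ _ (keysNodup_dset it1 _ _ hn)]
  cases lecturaAny dA || dashOf it1 with
  | false => simp
  | true => cases unidadNone it1 <;> simp

set_option maxHeartbeats 1000000 in
theorem aLoop_eq (items : List (List (String × Option String))) (cs : Option String)
    (h : ∀ it ∈ items, keysNodup it) :
    aLoop items cs = List.zipWith bTransform items (bSubjects items cs) := by
  induction items generalizing cs with
  | nil => rfl
  | cons it rest ih =>
    have hhd : keysNodup it := h it (List.mem_cons_self ..)
    have htl : ∀ x ∈ rest, keysNodup x := fun x hx => h x (List.mem_cons_of_mem _ hx)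
    have hcs : (if bTruthy (bGet it "asignatura") then bGet it "asignatura" else cs)
        = (if (match (match dget it "asignatura" with | some v => v | none => none) with
              | some s => s != "" | none => false) then
             (match dget it "asignatura" with | some v => v | none => none) else cs) := by
      rw [bTruthy_eq, bGet_eq]
      rcases dget it "asignatura" with _ | ov
      · rfl
      · rcases ov with _ | s <;> rfl
    simp only [aLoop, bSubjects, List.zipWith_cons_cons]
    rw [ih _ htl, hcs, List.cons_eq_cons]
    refine ⟨?_, rfl⟩
    unfold bTransform
    rw [bTruthy_eq]
    cases htr : (match (match dget it "asignatura" with | some v => v | none => none) with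
        | some s => s != "" | none => false) with
    | false =>
      simp only [Bool.false_eq_true, if_false]
      rw [bSet_eq_dset it _ _ hhd]
      exact lec_eq (dset it "asignatura" cs) (detalleOf it) (detalleOf_dset_asig it cs)
        (keysNodup_dset it _ _ hhd)
    | true =>
      simp only [if_true]
      exact lec_eq it (detalleOf it) rfl hhd

-- ===== VERDICT (by name: the statement is the Claim_ definition above) =====
theorem postprocess_items_spec : Claim_equal_postprocess_items := by
  intro items _ hpre
  unfold Spec_postprocess_items postprocess_items postprocess_items_alt
  exact aLoop_eq items none (fun it hit => (hpre it hit).1)
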